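-- pv_equiv track=rewrite | github.com/AstroGolem224/Sprite-Sheet-Cutter-Tool | grid_detector.py | _bands_to_gap_intervals
-- ===== SOURCE A (Python) =====
-- from typing import List, Tuple
--
-- def _bands_to_gap_intervals(
--     bands: List[Tuple[int, int]], total: int,
-- ) -> List[Tuple[int, int]] | None:
--     """Convert separator bands into cell intervals that sit *between* bands.
--
--     Each interval runs from the end of one band to the start of the next,
--     completely excluding any dark separator pixels from the cells.
--     """
--     if not bands:
--         return None
--
--     intervals: List[Tuple[int, int]] = []
--
--     # Leading interval (before the first band, if it doesn't start at 0)
--     if bands[0][0] > 10: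
--         intervals.append((0, bands[0][0]))
--
--     # Gaps between consecutive bands
--     for i in range(len(bands) - 1):
--         y0 = bands[i][1]       # end of current band
--         y1 = bands[i + 1][0]   # start of next band
--         if y1 - y0 > 10:
--             intervals.append((y0, y1))
--
--     # Trailing interval (after the last band, if it doesn't reach total)
--     if bands[-1][1] < total - 10:
--         intervals.append((bands[-1][1], total))
--
--     return intervals if intervals else None
-- ===== SOURCE B (Python) =====
-- from typing import List, Tuple
--
-- def _bands_to_gap_intervals(
--     bands: List[Tuple[int, int]], total: int,
-- ) -> List[Tuple[int, int]] | None: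
--     if not bands:
--         return None
--     # Complement of the bands within [0, total] by interval subtraction:
--     # each band splits the last free interval into the part before its start
--     # and the part after its end.
--     free: List[Tuple[int, int]] = [(0, total)]
--     for s, e in bands:
--         lo, hi = free.pop()
--         free.append((lo, s))
--         free.append((e, hi))
--     intervals = [(lo, hi) for lo, hi in free if hi - lo > 10]
--     return intervals or None
-- ===== Notes on version B (the rewrite author's own statement) =====
-- stated objective: alternative
-- what changed: Instead of A's three-case direct gap enumeration (leading check, index loop over adjacent band pairs, trailing check), B computes the complement of the bands within [0,total] by interval subtraction on a stack of free intervals (each band splits the last free interval), then filters out intervals of width <= 10.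
import Mathlib
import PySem

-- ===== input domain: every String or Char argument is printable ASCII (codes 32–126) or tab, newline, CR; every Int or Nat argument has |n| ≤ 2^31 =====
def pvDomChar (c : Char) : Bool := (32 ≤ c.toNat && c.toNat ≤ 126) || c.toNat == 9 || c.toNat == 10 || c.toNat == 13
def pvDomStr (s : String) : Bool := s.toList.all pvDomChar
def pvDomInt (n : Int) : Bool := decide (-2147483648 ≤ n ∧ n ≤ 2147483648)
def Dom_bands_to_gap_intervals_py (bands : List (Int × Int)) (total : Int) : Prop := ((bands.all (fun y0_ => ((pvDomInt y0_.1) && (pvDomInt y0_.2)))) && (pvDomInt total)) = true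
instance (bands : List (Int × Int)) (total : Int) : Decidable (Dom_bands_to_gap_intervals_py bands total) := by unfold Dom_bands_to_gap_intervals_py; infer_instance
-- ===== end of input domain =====

-- B replaces A's three-case direct gap enumeration with interval subtraction: each band
-- splits the last free interval of [0,total]; narrow intervals are filtered at the end.
-- Objective: alternative (same cost, different algorithm).

-- ===== PORT A =====
-- the loop body of A's 'for i in range(len(bands) - 1)' (indices are always in range)
def pvStepA (bands : List (Int × Int)) (acc : List (Int × Int)) (i : Nat) : List (Int × Int) :=
  let y0 := (bands.getD i (0, 0)).2
  let y1 := (bands.getD (i + 1) (0, 0)).1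
  if y1 - y0 > 10 then acc ++ [(y0, y1)] else acc

def bands_to_gap_intervals_py (bands : List (Int × Int)) (total : Int) : Option (List (Int × Int)) :=
  match bands with
  | [] => none
  | b0 :: _ =>
    let intervals1 : List (Int × Int) := if b0.1 > 10 then [((0 : Int), b0.1)] else []
    let intervals2 := (List.range (bands.length - 1)).foldl (pvStepA bands) intervals1
    let last := bands.getD (bands.length - 1) (0, 0)   -- bands[-1], nonempty here
    let intervals3 := if last.2 < total - 10 then intervals2 ++ [(last.2, total)] else intervals2
    if intervals3 = [] then none else some intervals3

-- ===== PORT B =====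
-- B's loop body: pop the last free interval and split it around the band (free is never
-- empty: it starts as [(0,total)] and each step grows it by one)
def pvSplitB (free : List (Int × Int)) (b : Int × Int) : List (Int × Int) :=
  let last := free.getLastD (0, 0)
  free.dropLast ++ [(last.1, b.1), (b.2, last.2)]

def bands_to_gap_intervals_py_alt (bands : List (Int × Int)) (total : Int) : Option (List (Int × Int)) :=
  match bands with
  | [] => none
  | _ :: _ =>
    let free := bands.foldl pvSplitB [((0 : Int), total)]
    let intervals := free.filter (fun p => p.2 - p.1 > 10)
    if intervals = [] then none else some intervals

-- ===== PRECONDITION & SPEC =====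
def Spec_bands_to_gap_intervals_py (bands : List (Int × Int)) (total : Int) (out : Option (List (Int × Int))) : Prop := out = bands_to_gap_intervals_py_alt bands total
instance (bands : List (Int × Int)) (total : Int) (out : Option (List (Int × Int))) : Decidable (Spec_bands_to_gap_intervals_py bands total out) := by unfold Spec_bands_to_gap_intervals_py; infer_instance

-- ===== CLAIM (what is proved, stated in full; the proofs are below) =====
def Claim_equal_bands_to_gap_intervals_py : Prop := ∀ (bands : List (Int × Int)) (total : Int), Dom_bands_to_gap_intervals_py bands total → Spec_bands_to_gap_intervals_py bands total (bands_to_gap_intervals_py bands total)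

-- ===== LEMMAS AND PROOFS =====

-- shifting the loop index by one drops the head band
theorem pvStepA_shift (b0 : Int × Int) (bands : List (Int × Int)) (acc : List (Int × Int)) (i : Nat) :
    pvStepA (b0 :: bands) acc (i + 1) = pvStepA bands acc i := by
  simp [pvStepA]

-- B's subtraction fold produces exactly the boundary pairs (cur,b0.1),(b0.2,b1.1),…,(last.2,total)
theorem pv_fold (bands : List (Int × Int)) : ∀ (acc : List (Int × Int)) (cur total : Int),
    bands.foldl pvSplitB (acc ++ [(cur, total)])
      = acc ++ ((cur :: bands.map (·.2)).zip (bands.map (·.1) ++ [total])) := by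
  induction bands with
  | nil => intro acc cur total; simp
  | cons b rest ih =>
    intro acc cur total
    have hstep : pvSplitB (acc ++ [(cur, total)]) b
        = (acc ++ [(cur, b.1)]) ++ [(b.2, total)] := by
      simp [pvSplitB]
    simp only [List.foldl_cons, hstep, ih, List.map_cons, List.cons_append, List.zip_cons_cons]
    simp

-- the core: A's index loop plus trailing interval equals the filtered tail boundary pairs
theorem pv_core (bands : List (Int × Int)) : ∀ (b0 : Int × Int) (acc : List (Int × Int)) (total : Int),
    (let bs := b0 :: bands
     let mid := (List.range bands.length).foldl (pvStepA bs) acc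
     let last := bs.getD (bs.length - 1) (0, 0)
     if last.2 < total - 10 then mid ++ [(last.2, total)] else mid)
    = acc ++ (((b0 :: bands).map (·.2)).zip (bands.map (·.1) ++ [total])).filter (fun p => p.2 - p.1 > 10) := by
  induction bands with
  | nil =>
    intro b0 acc total
    simp only [List.length_nil, List.range_zero, List.foldl_nil, List.map_nil, List.map_cons,
      List.nil_append, List.zip_cons_cons, List.zip_nil_right, List.filter_cons, List.filter_nil]
    by_cases h : b0.2 < total - 10
    · simp [h, show total - b0.2 > 10 by omega]
    · simp [h, show ¬ (total - b0.2 > 10) by omega]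
  | cons b1 rest ih =>
    intro b0 acc total
    have hfun : (fun (a : List (Int × Int)) (i : Nat) => pvStepA (b0 :: b1 :: rest) a (i + 1))
        = pvStepA (b1 :: rest) := by
      funext a i; exact pvStepA_shift b0 (b1 :: rest) a i
    have hacc0 : pvStepA (b0 :: b1 :: rest) acc 0
        = if b1.1 - b0.2 > 10 then acc ++ [(b0.2, b1.1)] else acc := by
      simp [pvStepA]
    have hIH := ih b1 (pvStepA (b0 :: b1 :: rest) acc 0) total
    simp only [List.length_cons, Nat.add_sub_cancel, List.getD_cons_succ] at hIH ⊢
    simp only [List.range_succ_eq_map, List.foldl_cons, List.foldl_map, hfun]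
    rw [hIH]
    simp only [List.map_cons, List.cons_append, List.zip_cons_cons, List.filter_cons]
    by_cases hg : b1.1 - b0.2 > 10
    · rw [hacc0, if_pos hg]
      simp [hg, List.append_assoc]
    · rw [hacc0, if_neg hg]
      simp [hg]

-- ===== VERDICT (by name: the statement is the Claim_ definition above) =====
theorem bands_to_gap_intervals_py_spec : Claim_equal_bands_to_gap_intervals_py := by
  intro bands total _
  unfold Spec_bands_to_gap_intervals_py
  match bands with
  | [] => rfl
  | b0 :: rest =>
    unfold bands_to_gap_intervals_py bands_to_gap_intervals_py_alt
    have hfree := pv_fold (b0 :: rest) [] 0 total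
    simp only [List.nil_append] at hfree
    have hcore := pv_core rest b0 (if b0.1 > 10 then [((0 : Int), b0.1)] else []) total
    simp only [List.length_cons, Nat.add_sub_cancel] at hcore ⊢
    have hfil : (((0 : Int) :: (b0 :: rest).map (·.2)).zip ((b0 :: rest).map (·.1) ++ [total])).filter
          (fun p => p.2 - p.1 > 10)
        = (if b0.1 > 10 then [((0 : Int), b0.1)] else [])
          ++ (((b0 :: rest).map (·.2)).zip (rest.map (·.1) ++ [total])).filter (fun p => p.2 - p.1 > 10) := by
      simp only [List.map_cons, List.cons_append, List.zip_cons_cons, List.filter_cons, sub_zero]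
      by_cases h0 : b0.1 > 10 <;> simp [h0]
    rw [hfree, hfil, hcore]
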